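-- pv_equiv track=rewrite | github.com/Hwangwoochan/slm_rag_benchmark | fine-tuning/oracle_sent_infer.py | truncate_by_chars
-- ===== SOURCE A (Python) =====
-- from typing import Any, Dict, List, Tuple, Optional
--
-- def truncate_by_chars(ctxs: List[str], max_chars: int) -> List[str]:
--     """
--     SLM 안전장치: context가 너무 길면 앞에서부터 문자 수 기준으로 컷
--     """
--     out: List[str] = []
--     total = 0
--     for s in ctxs:
--         if total + len(s) > max_chars:
--             break
--         out.append(s)
--         total += len(s)
--     return out
-- ===== SOURCE B (Python) =====
-- from itertools import accumulate
-- from bisect import bisect_right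
-- from typing import List
--
-- def truncate_by_chars(ctxs: List[str], max_chars: int) -> List[str]:
--     prefix = list(accumulate(len(s) for s in ctxs))
--     idx = bisect_right(prefix, max_chars)
--     return ctxs[:idx]
-- ===== Notes on version B (the rewrite author's own statement) =====
-- stated objective: alternative
-- what changed: Replaced the accumulating loop with early break by a cumulative-length table (itertools.accumulate) plus a binary search (bisect_right) for the cutoff index, returning a slice.
import Mathlib
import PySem

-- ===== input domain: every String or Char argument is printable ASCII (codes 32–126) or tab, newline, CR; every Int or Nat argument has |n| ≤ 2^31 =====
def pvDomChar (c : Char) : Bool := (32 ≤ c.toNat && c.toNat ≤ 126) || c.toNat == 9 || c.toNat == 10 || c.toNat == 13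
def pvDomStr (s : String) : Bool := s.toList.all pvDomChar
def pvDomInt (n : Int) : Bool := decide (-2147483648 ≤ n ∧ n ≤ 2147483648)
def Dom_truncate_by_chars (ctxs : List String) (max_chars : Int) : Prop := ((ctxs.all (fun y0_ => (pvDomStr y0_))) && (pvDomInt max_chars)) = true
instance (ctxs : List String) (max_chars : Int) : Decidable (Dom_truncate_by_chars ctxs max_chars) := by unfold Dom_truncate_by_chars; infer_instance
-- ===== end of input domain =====

-- B replaces A's accumulating loop with an accumulate-table plus bisect_right cutoff; alternative decomposition, same cost.

-- ===== PORT A =====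
-- A's for-loop with break, as structural recursion over the remaining list,
-- carrying the same state (out, total).
def truncate_by_chars_go (ctxs : List String) (out : List String) (total : Int)
    (max_chars : Int) : List String :=
  match ctxs with
  | [] => out
  | s :: rest =>
    if total + PySem.Str.len s > max_chars then out
    else truncate_by_chars_go rest (out ++ [s]) (total + PySem.Str.len s) max_chars

def truncate_by_chars (ctxs : List String) (max_chars : Int) : List String :=
  truncate_by_chars_go ctxs [] 0 max_chars

-- ===== PORT B =====
-- itertools.accumulate: running sums of a list of ints (hand port, exact).
def pyAccumulate (xs : List Int) (t : Int) : List Int :=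
  match xs with
  | [] => []
  | x :: r => (t + x) :: pyAccumulate r (t + x)

-- bisect.bisect_right on a sorted list = number of leading elements ≤ x;
-- exact here because the prefix sums of string lengths are non-decreasing.
def pyBisectRight (xs : List Int) (x : Int) : Nat :=
  (xs.takeWhile (fun p => decide (p ≤ x))).length

def truncate_by_chars_alt (ctxs : List String) (max_chars : Int) : List String :=
  let prefixTbl := pyAccumulate (ctxs.map PySem.Str.len) 0
  let idx := pyBisectRight prefixTbl max_chars
  ctxs.take idx

-- ===== PRECONDITION & SPEC =====
def Spec_truncate_by_chars (ctxs : List String) (max_chars : Int) (out : List String) : Prop := out = truncate_by_chars_alt ctxs max_chars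
instance (ctxs : List String) (max_chars : Int) (out : List String) : Decidable (Spec_truncate_by_chars ctxs max_chars out) := by unfold Spec_truncate_by_chars; infer_instance

-- ===== CLAIM (what is proved, stated in full; the proofs are below) =====
def Claim_equal_truncate_by_chars : Prop := ∀ (ctxs : List String) (max_chars : Int), Dom_truncate_by_chars ctxs max_chars → Spec_truncate_by_chars ctxs max_chars (truncate_by_chars ctxs max_chars)

-- ===== LEMMAS AND PROOFS =====
theorem truncate_go_eq (max_chars : Int) :
    ∀ (ctxs out : List String) (total : Int),
      truncate_by_chars_go ctxs out total max_chars =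
        out ++ ctxs.take
          (((pyAccumulate (ctxs.map PySem.Str.len) total).takeWhile
            (fun p => decide (p ≤ max_chars))).length) := by
  intro ctxs
  induction ctxs with
  | nil => intro out total; simp [truncate_by_chars_go, pyAccumulate]
  | cons s rest ih =>
    intro out total
    simp only [truncate_by_chars_go, List.map, pyAccumulate, List.takeWhile, PySem.Str.len, String.length_toList]
    by_cases h : total + (s.length : Int) > max_chars
    · have : decide (total + (s.length : Int) ≤ max_chars) = false := by
        simp; omega
      simp [h, this]
    · have : decide (total + (s.length : Int) ≤ max_chars) = true := by
        simp; omega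
      rw [if_neg h, ih, this]
      simp

-- ===== VERDICT (by name: the statement is the Claim_ definition above) =====
theorem truncate_by_chars_spec : Claim_equal_truncate_by_chars := by
  intro ctxs max_chars _
  unfold Spec_truncate_by_chars truncate_by_chars truncate_by_chars_alt pyBisectRight
  rw [truncate_go_eq]
  simp
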